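-- pv_equiv track=rewrite | github.com/Hans-Vader/squad-event-map-layer-vote | DebugScriptHelper/bot.py | _build_faction_meta_map
-- ===== SOURCE A (Python) =====
-- def _build_faction_meta_map(data: object) -> dict[str, dict]:
--     """Extract {factionID: {"alliance", "factionName"}} from the source's Units block."""
--     if not isinstance(data, dict):
--         return {}
--     units = data.get("Units")
--     if not isinstance(units, dict):
--         return {}
--     result: dict[str, dict] = {}
--     for unit in units.values():
--         if not isinstance(unit, dict):
--             continue
--         fid = unit.get("factionID")
--         if not fid:
--             continue
--         entry = result.setdefault(fid, {"alliance": "", "factionName": ""})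
--         if not entry["alliance"]:
--             alliance = unit.get("alliance") or ""
--             if alliance:
--                 entry["alliance"] = alliance
--         if not entry["factionName"]:
--             faction_name = unit.get("factionName") or ""
--             if faction_name:
--                 entry["factionName"] = faction_name
--     return result
-- ===== SOURCE B (Python) =====
-- def _build_faction_meta_map(data: object) -> dict[str, dict]:
--     """Extract {factionID: {"alliance", "factionName"}} from the source's Units block."""
--     if not isinstance(data, dict):
--         return {}
--     units = data.get("Units")
--     if not isinstance(units, dict):
--         return {}
--     # Pass 1: group the dict-valued units by truthy factionID, in iteration order.
--     groups: dict[str, list] = {}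
--     for unit in units.values():
--         if isinstance(unit, dict):
--             fid = unit.get("factionID")
--             if fid:
--                 groups.setdefault(fid, []).append(unit)
--     # Pass 2: for each faction take the first non-empty field value in order.
--     return {
--         fid: {
--             "alliance": next((u.get("alliance") for u in group if u.get("alliance")), ""),
--             "factionName": next((u.get("factionName") for u in group if u.get("factionName")), ""),
--         }
--         for fid, group in groups.items()
--     }
-- ===== Notes on version B (the rewrite author's own statement) =====
-- stated objective: alternative
-- what changed: Replaces A's single pass with mutable per-faction entry dicts by a grouping pass (factionID -> list of its units) followed by a rendering pass that picks each field as the first non-empty value via next() over a generator.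
import Mathlib
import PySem

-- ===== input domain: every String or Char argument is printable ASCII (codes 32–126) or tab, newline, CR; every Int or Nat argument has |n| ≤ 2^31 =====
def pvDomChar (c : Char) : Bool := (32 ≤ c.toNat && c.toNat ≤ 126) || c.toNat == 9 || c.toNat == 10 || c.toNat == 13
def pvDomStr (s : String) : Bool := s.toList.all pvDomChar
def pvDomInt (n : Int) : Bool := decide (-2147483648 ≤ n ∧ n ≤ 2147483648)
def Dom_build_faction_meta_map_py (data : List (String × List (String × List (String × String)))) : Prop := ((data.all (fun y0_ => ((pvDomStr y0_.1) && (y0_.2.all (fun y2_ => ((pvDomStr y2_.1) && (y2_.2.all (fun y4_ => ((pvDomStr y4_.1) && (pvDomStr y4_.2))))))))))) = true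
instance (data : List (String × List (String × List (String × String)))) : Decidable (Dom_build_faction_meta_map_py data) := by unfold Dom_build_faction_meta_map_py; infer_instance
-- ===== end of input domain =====

-- B re-decomposes A's single mutating pass into a grouping pass plus a rendering pass (objective: alternative).
-- Under the type convention all isinstance checks of the Python are true, so both ports elide them.

-- ===== PORT A =====
-- the two conditional field updates A performs on the (shared, mutable) entry dict;
-- entry["alliance"] / entry["factionName"]: the keys are always present on reachable entries, so getD "" is exact here
def pvUpd (entry : PySem.Dict String String) (unit : PySem.Dict String String) : PySem.Dict String String :=
  let entry :=
    if entry.getD "alliance" "" = "" then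
      let alliance := (unit.get? "alliance").getD ""
      if alliance ≠ "" then entry.insert "alliance" alliance else entry
    else entry
  if entry.getD "factionName" "" = "" then
    let fn := (unit.get? "factionName").getD ""
    if fn ≠ "" then entry.insert "factionName" fn else entry
  else entry

def pvAStep (result : PySem.Dict String (PySem.Dict String String)) (unitL : List (String × String)) :
    PySem.Dict String (PySem.Dict String String) :=
  let unit := PySem.Dict.mk unitL
  match unit.get? "factionID" with
  | none => result
  | some fid =>
    if fid = "" then result
    else
      let dflt : PySem.Dict String String := PySem.Dict.mk [("alliance", ""), ("factionName", "")]
      let result := result.setdefault fid dflt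
      let entry := result.getD fid dflt
      let entry := pvUpd entry unit
      result.insert fid entry

def build_faction_meta_map_py (data : List (String × List (String × List (String × String)))) :
    List (String × List (String × String)) :=
  match (PySem.Dict.mk data).get? "Units" with
  | none => []
  | some units =>
    let result := (PySem.Dict.mk units).values.foldl pvAStep PySem.Dict.empty
    result.items.map (fun p => (p.1, p.2.items))

-- ===== PORT B =====
-- next((u.get(key) for u in group if u.get(key)), "")
def pvFirstTruthy (key : String) (group : List (List (String × String))) : String :=
  match group.find? (fun u => ((PySem.Dict.mk u).get? key).getD "" ≠ "") with
  | some u => ((PySem.Dict.mk u).get? key).getD ""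
  | none => ""

-- groups.setdefault(fid, []).append(unit) for the dict-valued units with truthy factionID
def pvBStep (g : PySem.Dict String (List (List (String × String)))) (unitL : List (String × String)) :
    PySem.Dict String (List (List (String × String))) :=
  match (PySem.Dict.mk unitL).get? "factionID" with
  | none => g
  | some fid =>
    if fid = "" then g
    else g.insert fid (g.getD fid [] ++ [unitL])

def build_faction_meta_map_py_alt (data : List (String × List (String × List (String × String)))) :
    List (String × List (String × String)) :=
  match (PySem.Dict.mk data).get? "Units" with
  | none => []
  | some units =>
    let groups := (PySem.Dict.mk units).values.foldl pvBStep PySem.Dict.empty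
    groups.items.map (fun p =>
      (p.1, [("alliance", pvFirstTruthy "alliance" p.2), ("factionName", pvFirstTruthy "factionName" p.2)]))

-- ===== PRECONDITION & SPEC =====
def Spec_build_faction_meta_map_py (data : List (String × List (String × List (String × String)))) (out : List (String × List (String × String))) : Prop := out = build_faction_meta_map_py_alt data
instance (data : List (String × List (String × List (String × String)))) (out : List (String × List (String × String))) : Decidable (Spec_build_faction_meta_map_py data out) := by unfold Spec_build_faction_meta_map_py; infer_instance

-- ===== CLAIM (what is proved, stated in full; the proofs are below) =====
def Claim_equal_build_faction_meta_map_py : Prop := ∀ (data : List (String × List (String × List (String × String)))), Dom_build_faction_meta_map_py data → Spec_build_faction_meta_map_py data (build_faction_meta_map_py data)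

-- ===== LEMMAS AND PROOFS =====

-- the entry dict B's rendering pass produces for one group
def pvE (group : List (List (String × String))) : PySem.Dict String String :=
  PySem.Dict.mk [("alliance", pvFirstTruthy "alliance" group), ("factionName", pvFirstTruthy "factionName" group)]

-- render a groups dict into A's result dict
def pvRender (g : PySem.Dict String (List (List (String × String)))) :
    PySem.Dict String (PySem.Dict String String) :=
  PySem.Dict.mk (g.items.map (fun p => (p.1, pvE p.2)))

theorem pvRender_get? (g : PySem.Dict String (List (List (String × String)))) (k : String) :
    (pvRender g).get? k = (g.get? k).map pvE := by
  cases g with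
  | mk l =>
    induction l with
    | nil => rfl
    | cons p t ih =>
      simp only [pvRender, PySem.Dict.get?, List.map_cons, List.find?_cons] at *
      by_cases h : (p.1 == k) = true
      · simp [h]
      · simp only [h, Bool.false_eq_true] at *; exact ih

theorem pvRender_contains (g : PySem.Dict String (List (List (String × String)))) (k : String) :
    (pvRender g).contains k = g.contains k := by
  simp [pvRender, PySem.Dict.contains, List.any_map, Function.comp_def]

theorem pvRender_insert (g : PySem.Dict String (List (List (String × String)))) (k : String)
    (v : List (List (String × String))) :
    pvRender (g.insert k v) = (pvRender g).insert k (pvE v) := by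
  apply PySem.Dict.ext
  by_cases hc : g.contains k = true
  · rw [show pvRender (g.insert k v) = PySem.Dict.mk ((g.insert k v).items.map (fun p => (p.1, pvE p.2))) from rfl,
      PySem.Dict.items_insert_of_contains g v hc,
      PySem.Dict.items_insert_of_contains (pvRender g) (pvE v) (by rw [pvRender_contains]; exact hc)]
    simp only [pvRender, List.map_map]
    apply List.map_congr_left
    intro p _
    by_cases h : p.1 = k <;> simp [h]
  · have hc' : g.contains k = false := by simpa using hc
    rw [show pvRender (g.insert k v) = PySem.Dict.mk ((g.insert k v).items.map (fun p => (p.1, pvE p.2))) from rfl,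
      PySem.Dict.items_insert_of_not_contains g v hc',
      PySem.Dict.items_insert_of_not_contains (pvRender g) (pvE v) (by rw [pvRender_contains]; exact hc')]
    simp [pvRender]

theorem pvFirstTruthy_snoc (key : String) (gr : List (List (String × String))) (u : List (String × String)) :
    pvFirstTruthy key (gr ++ [u]) =
      if pvFirstTruthy key gr ≠ "" then pvFirstTruthy key gr
      else ((PySem.Dict.mk u).get? key).getD "" := by
  unfold pvFirstTruthy
  rw [List.find?_append]
  cases h : gr.find? (fun u => decide (((PySem.Dict.mk u).get? key).getD "" ≠ "")) with
  | none => simp [List.find?_singleton]; split_ifs with h1 <;> simp_all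
  | some w =>
    have hw := List.find?_some h
    simp only [decide_eq_true_eq] at hw
    simp [hw]

theorem pvUpd_mk (a f : String) (unit : PySem.Dict String String) :
    pvUpd (PySem.Dict.mk [("alliance", a), ("factionName", f)]) unit =
      PySem.Dict.mk [("alliance", if a ≠ "" then a else (unit.get? "alliance").getD ""),
                     ("factionName", if f ≠ "" then f else (unit.get? "factionName").getD "")] := by
  unfold pvUpd
  by_cases ha : a = "" <;> by_cases hf : f = "" <;>
    simp [ha, hf, PySem.Dict.getD, PySem.Dict.get?, PySem.Dict.insert, PySem.Dict.contains] <;>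
    split_ifs <;> simp_all

theorem pvE_snoc (gr : List (List (String × String))) (u : List (String × String)) :
    pvE (gr ++ [u]) = pvUpd (pvE gr) (PySem.Dict.mk u) := by
  unfold pvE
  rw [pvUpd_mk, pvFirstTruthy_snoc, pvFirstTruthy_snoc]

theorem pvStep_comm (g : PySem.Dict String (List (List (String × String)))) (u : List (String × String)) :
    pvAStep (pvRender g) u = pvRender (pvBStep g u) := by
  simp only [pvAStep, pvBStep]
  cases hf : (PySem.Dict.mk u).get? "factionID" with
  | none => rfl
  | some fid =>
    by_cases hfe : fid = ""
    · simp [hfe]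
    · simp only [if_neg hfe]
      by_cases hc : g.contains fid = true
      · rw [PySem.Dict.setdefault_of_contains (pvRender g)
          (PySem.Dict.mk [("alliance", ""), ("factionName", "")])
          (by rw [pvRender_contains]; exact hc)]
        have hsome : ∃ gr, g.get? fid = some gr := by
          rw [← Option.isSome_iff_exists, ← PySem.Dict.contains_eq_isSome_get?]; exact hc
        obtain ⟨gr, hgr⟩ := hsome
        have hgetD : g.getD fid ([] : List (List (String × String))) = gr := by
          simp [PySem.Dict.getD, hgr]
        have hRgetD : (pvRender g).getD fid (PySem.Dict.mk [("alliance", ""), ("factionName", "")]) = pvE gr := by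
          simp [PySem.Dict.getD, pvRender_get?, hgr]
        rw [hRgetD, hgetD, ← pvE_snoc, ← pvRender_insert]
      · have hc' : g.contains fid = false := by simpa using hc
        have hRc : (pvRender g).contains fid = false := by rw [pvRender_contains]; exact hc'
        rw [PySem.Dict.setdefault_of_not_contains (pvRender g)
            (PySem.Dict.mk [("alliance", ""), ("factionName", "")]) hRc,
          PySem.Dict.getD_insert_self, PySem.Dict.insert_insert_self,
          PySem.Dict.getD_of_not_contains g _ hc']
        have : (PySem.Dict.mk [("alliance", ""), ("factionName", "")] : PySem.Dict String String) = pvE [] := rfl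
        rw [this, ← pvE_snoc, ← pvRender_insert]

theorem pvFold_comm (us : List (List (String × String))) (g : PySem.Dict String (List (List (String × String)))) :
    us.foldl pvAStep (pvRender g) = pvRender (us.foldl pvBStep g) := by
  induction us generalizing g with
  | nil => rfl
  | cons u us ih => simp only [List.foldl_cons, pvStep_comm, ih]

theorem pvRender_items_map (g : PySem.Dict String (List (List (String × String)))) :
    (pvRender g).items.map (fun p => (p.1, p.2.items)) =
      g.items.map (fun p =>
        (p.1, [("alliance", pvFirstTruthy "alliance" p.2), ("factionName", pvFirstTruthy "factionName" p.2)])) := by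
  simp [pvRender, List.map_map, Function.comp, pvE]

-- ===== VERDICT (by name: the statement is the Claim_ definition above) =====
theorem build_faction_meta_map_py_spec : Claim_equal_build_faction_meta_map_py := by
  intro data _
  unfold Spec_build_faction_meta_map_py build_faction_meta_map_py build_faction_meta_map_py_alt
  cases h : (PySem.Dict.mk data).get? "Units" with
  | none => rfl
  | some units =>
    have he : (PySem.Dict.empty : PySem.Dict String (PySem.Dict String String)) = pvRender PySem.Dict.empty := rfl
    simp only [he, pvFold_comm, pvRender_items_map]
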